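-- pv_equiv track=rewrite | github.com/yooneverse/spartaclub | 0904/4831.전기버스.py | bus_move
-- ===== SOURCE A (Python) =====
-- def bus_move(k, n, stop):
--     last = 0  # 마지막 충전 위치
--     bus = k  # 현재 버스가 갈 수 있는 최대 위치
--     cnt = 0  # 충전 횟수
--
--     while bus < n:  # 아직 도착지점(n)에 도착하지 못했다면
--         # 뒤로 가면서 충전소 찾기
--         while bus > last and stop[bus] == 0:  # 현재 위치에 충전소가 없으면 한 칸씩 뒤로 이동
--             bus -= 1
--
--         # 만약 충전소가 아예 없어서 last까지 되돌아왔다면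
--         if bus == last:  # 이전 충전 위치와 같아졌다는 건 충전 불가라는 의미
--             return 0
--
--         # 충전 성공
--         last = bus  # 현재 위치를 마지막 충전 위치로 갱신
--         cnt += 1  # 충전 횟수 +1
--         bus += k  # 충전했으니 다시 k만큼 전진
--
--     return cnt  # 도착지에 도달했을 때 총 충전 횟수 반환
-- ===== SOURCE B (Python) =====
-- def bus_move(k, n, stop):
--     # Precompute, in one pass, best[i] = the rightmost station position <= i
--     # (0 when there is none; position 0 is never a station), then greedily
--     # jump via table lookups -- no inner scan at all.
--     if k >= n:
--         return 0
--     best = [0] * n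
--     b = 0
--     for i in range(1, n):
--         if stop[i] != 0:
--             b = i
--         best[i] = b
--     last = 0
--     cnt = 0
--     while True:
--         j = best[last + k]
--         if j <= last:
--             return 0
--         cnt += 1
--         last = j
--         if last + k >= n:
--             return cnt
-- ===== Notes on version B (the rewrite author's own statement) =====
-- stated objective: alternative
-- what changed: Replaces A's repeated backward scans with a precomputed table best[i] = rightmost station at or before i (built in one forward pass), after which each refuel is a single table lookup instead of a scan.
-- outside the precondition, e.g. on bus_move(2, 4, [0, 1, 2]): A returns 1, B raises IndexError; on bus_move(0, 5, []): A returns 0, B raises IndexError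
import Mathlib
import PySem

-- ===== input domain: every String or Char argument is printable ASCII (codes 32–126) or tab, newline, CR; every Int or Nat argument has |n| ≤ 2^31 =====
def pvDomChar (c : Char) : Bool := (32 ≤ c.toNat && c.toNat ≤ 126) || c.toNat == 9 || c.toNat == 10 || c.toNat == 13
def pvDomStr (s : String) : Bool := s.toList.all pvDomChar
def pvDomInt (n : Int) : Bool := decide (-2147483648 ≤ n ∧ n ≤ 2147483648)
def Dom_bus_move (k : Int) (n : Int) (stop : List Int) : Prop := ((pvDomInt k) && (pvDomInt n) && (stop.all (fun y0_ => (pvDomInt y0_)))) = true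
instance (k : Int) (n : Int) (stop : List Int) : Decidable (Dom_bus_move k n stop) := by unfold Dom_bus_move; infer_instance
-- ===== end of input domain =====

-- B replaces A's repeated backward station scans with a precomputed rightmost-station
-- table built in one forward pass, then greedy jumps by table lookup; equivalence on Pre_.


-- ===== PORT A =====
-- inner `while bus > last and stop[bus] == 0: bus -= 1`; structural fuel (= exact
-- number of possible decrements, (bus-last).toNat at the call site) makes it total.
def busInner (stop : List Int) (last : Int) (fuel : Nat) (bus : Int) : Int :=
  match fuel with
  | 0 => bus
  | f + 1 =>
    if bus > last ∧ PySem.List.pyGetD stop bus 0 = 0 then busInner stop last f (bus - 1)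
    else bus

-- outer `while bus < n`; fuel n.toNat+1 suffices on Pre_ (last strictly increases below n).
def busOuter (stop : List Int) (k n : Int) (fuel : Nat) (last bus cnt : Int) : Int :=
  match fuel with
  | 0 => 0
  | f + 1 =>
    if bus < n then
      let b := busInner stop last ((bus - last).toNat) bus
      if b = last then 0
      else busOuter stop k n f b (b + k) (cnt + 1)
    else cnt

def bus_move (k : Int) (n : Int) (stop : List Int) : Int :=
  busOuter stop k n (n.toNat + 1) 0 k 0

-- ===== PORT B =====
-- `for i in range(1, n): if stop[i] != 0: b = i; best[i] = b` — builds the table of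
-- rightmost station positions by appending; fuel = exact iteration count n-1.
def buildBest (stop : List Int) (fuel : Nat) (i b : Int) (acc : List Int) : List Int :=
  match fuel with
  | 0 => acc
  | f + 1 =>
    let b' := if PySem.List.pyGetD stop i 0 ≠ 0 then i else b
    buildBest stop f (i + 1) b' (acc ++ [b'])

-- `while True:` jump loop over the table; on Pre_ it terminates within n.toNat+1 rounds.
def loopB (best : List Int) (k n : Int) (fuel : Nat) (last cnt : Int) : Int :=
  match fuel with
  | 0 => 0
  | f + 1 =>
    let j := PySem.List.pyGetD best (last + k) 0
    if j ≤ last then 0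
    else if j + k ≥ n then cnt + 1
    else loopB best k n f j (cnt + 1)

def bus_move_alt (k : Int) (n : Int) (stop : List Int) : Int :=
  if k ≥ n then 0
  else loopB (buildBest stop (n.toNat - 1) 1 0 [0]) k n (n.toNat + 1) 0 0

-- ===== PRECONDITION & SPEC =====
-- Pre_ excludes negative k with k < n (A never finds a station behind position 0 and
-- loops forever) and n > len(stop) (A's scan can read stop[bus] past the end and raise
-- IndexError); on the few excluded inputs where A still returns (it reaches n before
-- indexing past the list, or k = 0 so it returns 0 without indexing) B raises IndexError
-- while building its table.
def Pre_bus_move (k : Int) (n : Int) (stop : List Int) : Prop :=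
  n ≤ k ∨ (0 ≤ k ∧ n ≤ (stop.length : Int))
instance (k : Int) (n : Int) (stop : List Int) : Decidable (Pre_bus_move k n stop) := by
  unfold Pre_bus_move; infer_instance

def pvWitness_bus_move : Int × Int × List Int := (2, 5, [0, 1, 0, 1, 0])

def Spec_bus_move (k : Int) (n : Int) (stop : List Int) (out : Int) : Prop := out = bus_move_alt k n stop
instance (k : Int) (n : Int) (stop : List Int) (out : Int) : Decidable (Spec_bus_move k n stop out) := by unfold Spec_bus_move; infer_instance

-- ===== CLAIM (what is proved, stated in full; the proofs are below) =====
def Claim_equal_bus_move : Prop := ∀ (k : Int) (n : Int) (stop : List Int), Dom_bus_move k n stop → Pre_bus_move k n stop → Spec_bus_move k n stop (bus_move k n stop)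

-- ===== LEMMAS AND PROOFS =====

-- Proof-side spec: G stop m = rightmost station position in [1, m] (0 if none).
def G (stop : List Int) : Nat → Int
  | 0 => 0
  | m + 1 => if PySem.List.pyGetD stop ((m + 1 : Nat) : Int) 0 ≠ 0 then ((m + 1 : Nat) : Int) else G stop m

lemma G_le (stop : List Int) (m : Nat) : G stop m ≤ (m : Int) := by
  induction m with
  | zero => simp [G]
  | succ m ih => unfold G; split <;> push_cast <;> omega

-- A's backward scan computes max(G bus, last).
lemma inner_eq (stop : List Int) :
    ∀ (d : Nat) (last bus : Int), 0 ≤ last → last ≤ bus → (bus - last).toNat = d →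
    busInner stop last d bus = max (G stop bus.toNat) last := by
  intro d
  induction d with
  | zero =>
    intro last bus h0 h1 h2
    have : bus = last := by omega
    subst this
    unfold busInner
    have := G_le stop bus.toNat
    have : (bus.toNat : Int) = bus := by omega
    omega
  | succ f ih =>
    intro last bus h0 h1 h2
    have hbl : last < bus := by omega
    have hcast : ((bus - 1).toNat + 1 : Nat) = bus.toNat := by omega
    have hGe : G stop bus.toNat =
        if PySem.List.pyGetD stop (((bus - 1).toNat + 1 : Nat) : Int) 0 ≠ 0
        then (((bus - 1).toNat + 1 : Nat) : Int) else G stop (bus - 1).toNat := by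
      rw [← hcast]; rfl
    have hcast2 : ((((bus - 1).toNat + 1 : Nat)) : Int) = bus := by omega
    rw [hcast2] at hGe
    unfold busInner
    by_cases hz : PySem.List.pyGetD stop bus 0 = 0
    · rw [if_pos ⟨hbl, hz⟩]
      rw [ih last (bus - 1) h0 (by omega) (by omega)]
      rw [hGe, if_neg (by simpa using hz)]
    · rw [if_neg (by tauto)]
      rw [hGe, if_pos hz]
      have := G_le stop (bus - 1).toNat
      omega

-- The forward table-building pass produces exactly the map of G over positions.
lemma buildBest_eq (stop : List Int) :
    ∀ (f : Nat) (i : Int), 1 ≤ i →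
    buildBest stop f i (G stop (i.toNat - 1)) ((List.range i.toNat).map (fun m => G stop m)) =
      (List.range (i.toNat + f)).map (fun m => G stop m) := by
  intro f
  induction f with
  | zero => intro i h1; simp [buildBest]
  | succ f ih =>
    intro i h1
    unfold buildBest
    have hcast : (i.toNat - 1) + 1 = i.toNat := by omega
    have hcast2 : (((i.toNat - 1) + 1 : Nat) : Int) = i := by omega
    have hb' : (if PySem.List.pyGetD stop i 0 ≠ 0 then i else G stop (i.toNat - 1)) = G stop i.toNat := by
      obtain ⟨m, hm⟩ : ∃ m, i.toNat = m + 1 := ⟨i.toNat - 1, by omega⟩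
      have hmc : ((m + 1 : Nat) : Int) = i := by omega
      have hm1 : i.toNat - 1 = m := by omega
      rw [hm1, hm]
      show _ = G stop (m + 1)
      conv_rhs => rw [G]
      rw [hmc]
    simp only [hb']
    have hacc : (List.range i.toNat).map (fun m => G stop m) ++ [G stop i.toNat] =
        (List.range (i + 1).toNat).map (fun m => G stop m) := by
      have : (i + 1).toNat = i.toNat + 1 := by omega
      rw [this, List.range_succ, List.map_append]
      rfl
    have hG : G stop i.toNat = G stop ((i + 1).toNat - 1) := by
      have h : (i + 1).toNat - 1 = i.toNat := by omega
      rw [h]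
    rw [hacc, hG, ih (i + 1) (by omega)]
    have h2 : (i + 1).toNat + f = i.toNat + (f + 1) := by omega
    rw [h2]

lemma best_eq (stop : List Int) (n : Int) (hn : 1 ≤ n) :
    buildBest stop (n.toNat - 1) 1 0 [0] = (List.range n.toNat).map (fun m => G stop m) := by
  have h0 : ([0] : List Int) = (List.range (1 : Int).toNat).map (fun m => G stop m) := by
    simp [G]
  have hG0 : (0 : Int) = G stop ((1 : Int).toNat - 1) := by simp [G]
  rw [h0, hG0, buildBest_eq stop (n.toNat - 1) 1 (by omega)]
  have h : (1 : Int).toNat + (n.toNat - 1) = n.toNat := by omega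
  rw [h]

lemma getD_G (stop : List Int) (n j : Int) (h0 : 0 ≤ j) (h1 : j < n) :
    PySem.List.pyGetD ((List.range n.toNat).map (fun m => G stop m)) j 0 = G stop j.toNat := by
  have hlt : j.toNat < n.toNat := by omega
  have hj : ((j.toNat : Nat) : Int) = j := by omega
  rw [← hj, PySem.List.pyGetD_natCast, List.getD_eq_getElem?_getD]
  simp [hlt]
  congr 1
  omega

-- Main correspondence between A's outer loop and B's jump loop.
lemma main (stop : List Int) (k n : Int) (hk : 0 ≤ k) :
    ∀ (F : Nat) (last cnt : Int), 0 ≤ last → last + k < n → (n - last).toNat ≤ F →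
    busOuter stop k n F last (last + k) cnt =
      loopB ((List.range n.toNat).map (fun m => G stop m)) k n F last cnt := by
  intro F
  induction F with
  | zero => intro last cnt h0 h1 hF; rfl
  | succ f ih =>
    intro last cnt h0 h1 hF
    conv_lhs => unfold busOuter
    conv_rhs => unfold loopB
    rw [if_pos (by omega : last + k < n)]
    rw [getD_G stop n (last + k) (by omega) h1]
    rw [inner_eq stop ((last + k - last).toNat) last (last + k) h0 (by omega) rfl]
    set g := G stop (last + k).toNat with hg
    by_cases hle : g ≤ last
    · have : max g last = last := by omega
      rw [this, if_pos rfl, if_pos hle]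
    · have hmax : max g last = g := by omega
      rw [hmax, if_neg (by omega : ¬ g = last), if_neg (by omega : ¬ g ≤ last)]
      have hgle : g ≤ last + k := by
        have h := G_le stop (last + k).toNat
        omega
      by_cases hend : g + k ≥ n
      · rw [if_pos hend]
        have hf1 : ∃ f', f = f' + 1 := ⟨f - 1, by omega⟩
        obtain ⟨f', hf'⟩ := hf1
        subst hf'
        unfold busOuter
        rw [if_neg (by omega : ¬ g + k < n)]
      · rw [if_neg hend]
        exact ih g (cnt + 1) (by omega) (by omega) (by omega)

-- ===== VERDICT (by name: the statement is the Claim_ definition above) =====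
theorem bus_move_spec : Claim_equal_bus_move := by
  intro k n stop _ hpre
  unfold Spec_bus_move bus_move bus_move_alt
  by_cases hkn : k ≥ n
  · rw [if_pos hkn]
    unfold busOuter
    rw [if_neg (by omega : ¬ k < n)]
  · have hk : 0 ≤ k := by
      rcases hpre with h | h
      · omega
      · exact h.1
    rw [if_neg hkn]
    rw [best_eq stop n (by omega)]
    have := main stop k n hk (n.toNat + 1) 0 0 le_rfl (by omega) (by omega)
    simpa using this
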